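-- pv_equiv track=rewrite | github.com/Gauravkumar2701/LinuxWcCliTool | cli.py | getNumberOfWords
-- ===== SOURCE A (Python) =====
-- def getNumberOfWords(file):
--     count = 0
--     for line in file:
--
--         numberOfWords = line.split(" ")
--
--         for word in numberOfWords:
--
--             if word != " ":
--                 count += 1
--
--     return count
-- ===== SOURCE B (Python) =====
-- def getNumberOfWords(file):
--     count = 0
--     for line in file:
--         count += line.count(" ") + 1
--     return count
-- ===== Notes on version B (the rewrite author's own statement) =====
-- stated objective: simpler
-- what changed: Replaces splitting each line into a list and iterating it (with a guard that never fires, since split(' ') can never yield ' ') by a single accumulation of line.count(' ') + 1 per line, using len(line.split(' ')) == line.count(' ') + 1.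
import Mathlib
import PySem

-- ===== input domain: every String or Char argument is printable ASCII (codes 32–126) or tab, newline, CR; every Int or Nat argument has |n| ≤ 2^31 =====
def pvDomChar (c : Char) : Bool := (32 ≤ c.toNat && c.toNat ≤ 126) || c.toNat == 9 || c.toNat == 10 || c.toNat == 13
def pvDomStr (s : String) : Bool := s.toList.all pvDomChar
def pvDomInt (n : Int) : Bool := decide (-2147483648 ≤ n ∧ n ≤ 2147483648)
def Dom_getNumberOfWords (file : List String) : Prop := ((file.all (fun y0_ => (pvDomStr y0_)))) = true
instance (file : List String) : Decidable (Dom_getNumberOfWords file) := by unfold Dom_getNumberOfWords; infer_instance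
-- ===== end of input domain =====

-- B replaces per-line splitting and an inner loop by accumulating line.count(" ") + 1 per line (simpler, no intermediate lists).


-- ===== PORT A =====
-- for line in file: for word in line.split(" "): if word != " ": count += 1
-- (split(" ") has a non-empty separator, so Str.split? always returns some)
def getNumberOfWords (file : List String) : Int :=
  file.foldl (fun count line =>
    let numberOfWords := (PySem.Str.split? line " ").getD []
    numberOfWords.foldl (fun c word => if word ≠ " " then c + 1 else c) count) 0

-- ===== PORT B =====
-- for line in file: count += line.count(" ") + 1
def getNumberOfWords_alt (file : List String) : Int :=
  file.foldl (fun count line => count + (PySem.Str.count line " " : Int) + 1) 0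

-- ===== PRECONDITION & SPEC =====
def Spec_getNumberOfWords (file : List String) (out : Int) : Prop := out = getNumberOfWords_alt file
instance (file : List String) (out : Int) : Decidable (Spec_getNumberOfWords file out) := by unfold Spec_getNumberOfWords; infer_instance

-- ===== CLAIM (what is proved, stated in full; the proofs are below) =====
def Claim_equal_getNumberOfWords : Prop := ∀ (file : List String), Dom_getNumberOfWords file → Spec_getNumberOfWords file (getNumberOfWords file)

-- ===== LEMMAS AND PROOFS =====

-- count.go with a single-char separator [' '] and enough fuel is the accumulator plus List.count ' '
theorem pv_count_go (fuel : Nat) (l : List Char) (acc : Nat) (h : l.length ≤ fuel) :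
    PySem.Chars.count.go [' '] fuel l acc = acc + l.count ' ' := by
  induction fuel generalizing l acc with
  | zero =>
    have hl : l = [] := List.eq_nil_of_length_eq_zero (Nat.le_zero.mp h)
    subst hl
    simp [PySem.Chars.count.go]
  | succ f ih =>
    match l with
    | [] => simp [PySem.Chars.count.go]
    | c :: rest =>
      simp only [PySem.Chars.count.go]
      by_cases hc : c = ' '
      · subst hc
        simp only [List.isPrefixOf, Bool.and_true, beq_self_eq_true,
          if_pos]
        rw [show List.drop [' '].length (' ' :: rest) = rest from rfl,
          ih rest (acc + 1) (by simpa using Nat.lt_succ_iff.mp (by simpa using h))]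
        simp
        omega
      · have : ([' '].isPrefixOf (c :: rest)) = false := by
          simp [List.isPrefixOf]
          exact fun hr => (hc hr.symm).elim
        rw [this]
        simp only [Bool.false_eq_true, if_false]
        rw [ih rest acc (by simpa using Nat.lt_succ_iff.mp (by simpa using h))]
        simp [hc]

-- splitOn.go with separator [' ']: number of pieces, and no piece equals " "
theorem pv_split_go (fuel : Nat) (l cur : List Char) (acc : List (List Char))
    (h : l.length < fuel) (hcur : ' ' ∉ cur) (hacc : ∀ p ∈ acc, p ≠ [' ']) :
    (PySem.Chars.splitOn.go [' '] fuel l cur acc).length = acc.length + 1 + l.count ' ' ∧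
    (∀ p ∈ PySem.Chars.splitOn.go [' '] fuel l cur acc, p ≠ [' ']) := by
  induction fuel generalizing l cur acc with
  | zero => omega
  | succ f ih =>
    match l with
    | [] =>
      simp only [PySem.Chars.splitOn.go]
      constructor
      · simp
      · intro p hp
        simp only [List.mem_reverse, List.mem_cons] at hp
        rcases hp with h1 | h2
        · subst h1
          intro he
          have : ' ' ∈ cur.reverse := by rw [he]; simp
          exact hcur (by simpa using this)
        · exact hacc p h2
    | c :: rest =>
      simp only [PySem.Chars.splitOn.go]
      by_cases hc : c = ' '
      · subst hc
        simp only [List.isPrefixOf, Bool.and_true, beq_self_eq_true,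
          if_pos]
        have hacc' : ∀ p ∈ cur.reverse :: acc, p ≠ [' '] := by
          intro p hp
          rcases List.mem_cons.mp hp with h1 | h2
          · subst h1
            intro he
            have : ' ' ∈ cur.reverse := by rw [he]; simp
            exact hcur (by simpa using this)
          · exact hacc p h2
        have hlen : (List.drop [' '].length (' ' :: rest)).length < f := by
          simp at h ⊢; omega
        obtain ⟨h1, h2⟩ := ih (List.drop [' '].length (' ' :: rest)) [] (cur.reverse :: acc)
          hlen (by simp) hacc'
        refine ⟨?_, h2⟩
        rw [h1]
        simp
        omega
      · have : ([' '].isPrefixOf (c :: rest)) = false := by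
          simp [List.isPrefixOf]
          exact fun hr => (hc hr.symm).elim
        rw [this]
        simp only [Bool.false_eq_true, if_false]
        have hcur' : ' ' ∉ c :: cur := by
          intro hm
          rcases List.mem_cons.mp hm with h1 | h2
          · exact hc h1.symm
          · exact hcur h2
        obtain ⟨h1, h2⟩ := ih rest (c :: cur) acc (by simpa using Nat.lt_succ_iff.mp (by simpa [Nat.lt_succ_iff] using h)) hcur' hacc
        refine ⟨h1.trans ?_, h2⟩
        simp [hc]

-- per line: the inner split-and-filter loop of A equals count + line.count(" ") + 1
theorem pv_line (count : Int) (line : String) :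
    (((PySem.Str.split? line " ").getD []).foldl
        (fun c word => if word ≠ " " then c + 1 else c) count)
      = count + (PySem.Str.count line " " : Int) + 1 := by
  have hsep : (" " : String).toList = [' '] := rfl
  have hsplit : PySem.Str.split? line " " =
      some ((PySem.Chars.splitOn line.toList [' ']).map String.ofList) := by
    rw [PySem.Str.split?, hsep, PySem.Chars.split?, if_neg (by simp)]
    rfl
  obtain ⟨hlen, hne⟩ := pv_split_go (line.toList.length + 1) line.toList [] []
    (Nat.lt_succ_self _) (by simp) (by simp)
  have hgo : PySem.Chars.splitOn line.toList [' '] =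
      PySem.Chars.splitOn.go [' '] (line.toList.length + 1) line.toList [] [] := rfl
  rw [hsplit]
  simp only [Option.getD_some]
  rw [PySem.List.foldl_ite_add_one]
  have hcount : PySem.Str.count line " " = line.toList.count ' ' := by
    rw [PySem.Str.count_eq, hsep, PySem.Chars.count, if_neg (by simp),
      pv_count_go _ _ _ (le_refl _)]
    simp
  have hall : ((PySem.Chars.splitOn line.toList [' ']).map String.ofList).countP
      (fun word => decide ¬ word = " ") = (PySem.Chars.splitOn line.toList [' ']).length := by
    rw [List.countP_eq_length.mpr]
    · simp
    · intro w hw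
      rcases List.mem_map.mp hw with ⟨p, hp, rfl⟩
      have hpne : p ≠ [' '] := by rw [hgo] at hp; exact hne p hp
      simp only [decide_eq_true_eq]
      intro he
      apply hpne
      have : (String.ofList p).toList = (" " : String).toList := by rw [he]
      simpa using this
  rw [hall, hgo] at *
  rw [hlen, hcount]
  push_cast
  ring_nf
  simp

-- ===== VERDICT (by name: the statement is the Claim_ definition above) =====
theorem pv_main (file : List String) :
    getNumberOfWords file = getNumberOfWords_alt file := by
  unfold getNumberOfWords getNumberOfWords_alt
  induction file using List.reverseRecOn with
  | nil => rfl
  | append_singleton xs x ih =>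
    rw [List.foldl_append, List.foldl_append, ih]
    simp only [List.foldl_cons, List.foldl_nil]
    exact pv_line _ x

theorem getNumberOfWords_spec : Claim_equal_getNumberOfWords := by
  intro file _
  exact pv_main file
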